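-- pv_equiv track=rewrite | github.com/royw/appimage-updater | src/appimage_updater/pattern_gen/pattern_generation.py | _strip_extensions_list
-- ===== SOURCE A (Python) =====
-- def _strip_extensions_list(filenames: list[str]) -> list[str]:
--     exts = (".AppImage", ".appimage", ".zip", ".ZIP")
--     result = []
--     for name in filenames:
--         for ext in exts:
--             if name.endswith(ext):
--                 result.append(name[: -len(ext)])
--                 break
--         else:
--             result.append(name)
--     return result
-- ===== SOURCE B (Python) =====
-- def _strip_extensions_list(filenames: list[str]) -> list[str]:
--     known = ("AppImage", "appimage", "zip", "ZIP")
--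
--     def strip_one(name: str) -> str:
--         stem, dot, ext = name.rpartition(".")
--         return stem if dot and ext in known else name
--
--     return [strip_one(name) for name in filenames]
-- ===== Notes on version B (the rewrite author's own statement) =====
-- stated objective: idiomatic
-- what changed: B replaces A's inner scan over four suffixes with repeated endswith checks by a single rpartition at the last dot followed by one membership test of the extension, built as a list comprehension.
import Mathlib
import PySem

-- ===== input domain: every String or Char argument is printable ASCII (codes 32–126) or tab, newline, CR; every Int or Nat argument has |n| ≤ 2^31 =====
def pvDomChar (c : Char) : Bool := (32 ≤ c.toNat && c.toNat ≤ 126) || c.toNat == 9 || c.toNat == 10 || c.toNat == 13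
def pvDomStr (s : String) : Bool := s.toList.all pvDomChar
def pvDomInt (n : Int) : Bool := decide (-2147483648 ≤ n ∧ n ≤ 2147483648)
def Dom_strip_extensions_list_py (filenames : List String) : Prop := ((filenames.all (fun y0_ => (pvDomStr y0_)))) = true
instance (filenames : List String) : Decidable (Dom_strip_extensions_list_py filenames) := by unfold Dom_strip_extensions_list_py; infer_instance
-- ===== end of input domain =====

-- B replaces A's inner endswith-scan over four suffixes by one rpartition at the last dot
-- plus a membership test of the extension (objective: idiomatic).

-- ===== PORT A =====
def pvExtsA : List String := [".AppImage", ".appimage", ".zip", ".ZIP"]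

-- the inner 'for ext in exts: … break / else:' loop of A
def pvScanA (name : String) : List String → String
  | [] => name
  | ext :: rest =>
      if PySem.Str.endswith name ext then
        PySem.Str.slice name none (some (-(PySem.Str.len ext)))
      else pvScanA name rest

def strip_extensions_list_py (filenames : List String) : List String :=
  filenames.foldl (fun result name => result ++ [pvScanA name pvExtsA]) []

-- ===== PORT B =====
def pvKnown : List (List Char) := ["AppImage".toList, "appimage".toList, "zip".toList, "ZIP".toList]

-- hand port of name.rpartition(".") (exact for this one-char separator): scans the REVERSED
-- characters for the first '.'; some (extRev, stemRev) with ext/stem reversed, none when no dot.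
def pvRPartRev : List Char → Option (List Char × List Char)
  | [] => none
  | c :: rest =>
      if c = '.' then some ([], rest)
      else
        match pvRPartRev rest with
        | none => none
        | some (e, st) => some (c :: e, st)

def pvStripOne (name : String) : String :=
  match pvRPartRev name.toList.reverse with
  | some (extRev, stemRev) =>
      if extRev.reverse ∈ pvKnown then String.ofList stemRev.reverse else name
  | none => name

def strip_extensions_list_py_alt (filenames : List String) : List String :=
  filenames.map pvStripOne

-- ===== PRECONDITION & SPEC =====
def Spec_strip_extensions_list_py (filenames : List String) (out : List String) : Prop := out = strip_extensions_list_py_alt filenames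
instance (filenames : List String) (out : List String) : Decidable (Spec_strip_extensions_list_py filenames out) := by unfold Spec_strip_extensions_list_py; infer_instance

-- ===== CLAIM (what is proved, stated in full; the proofs are below) =====
def Claim_equal_strip_extensions_list_py : Prop := ∀ (filenames : List String), Dom_strip_extensions_list_py filenames → Spec_strip_extensions_list_py filenames (strip_extensions_list_py filenames)

-- ===== LEMMAS AND PROOFS =====

lemma pvRPartRev_none {rs : List Char} (h : pvRPartRev rs = none) : '.' ∉ rs := by
  induction rs with
  | nil => simp
  | cons c rest ih =>
      by_cases hc : c = '.'
      · simp [pvRPartRev, hc] at h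
      · cases hrec : pvRPartRev rest with
        | none =>
            simp only [List.mem_cons]
            rintro (hd | hm)
            · exact hc hd.symm
            · exact ih hrec hm
        | some p => simp [pvRPartRev, hc, hrec] at h

lemma pvRPartRev_some {rs e st : List Char} (h : pvRPartRev rs = some (e, st)) :
    rs = e ++ '.' :: st ∧ '.' ∉ e := by
  induction rs generalizing e st with
  | nil => simp [pvRPartRev] at h
  | cons c rest ih =>
      by_cases hc : c = '.'
      · simp [pvRPartRev, hc] at h
        obtain ⟨he, hst⟩ := h
        exact ⟨by simp [hc, he, hst], by simp [he]⟩
      · cases hrec : pvRPartRev rest with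
        | none => simp [pvRPartRev, hc, hrec] at h
        | some p =>
            obtain ⟨e', st'⟩ := p
            simp [pvRPartRev, hc, hrec] at h
            obtain ⟨he, hst⟩ := h
            obtain ⟨hrs, hdot⟩ := ih hrec
            subst hst
            refine ⟨by rw [← he, hrs]; simp, ?_⟩
            rw [← he]
            simp only [List.mem_cons]
            rintro (hd | hm)
            · exact hc hd.symm
            · exact hdot hm

lemma prefix_dot_unique {q e s' s : List Char} (hq : '.' ∉ q) (he : '.' ∉ e)
    (h : (q ++ '.' :: s') <+: (e ++ '.' :: s)) : q = e := by
  induction q generalizing e with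
  | nil =>
      cases e with
      | nil => rfl
      | cons d e' =>
          obtain ⟨t, ht⟩ := h
          simp at ht
          exact absurd (by simp [← ht.1]) he
  | cons c q' ih =>
      cases e with
      | nil =>
          obtain ⟨t, ht⟩ := h
          simp at ht
          exact absurd (by simp [ht.1]) hq
      | cons d e' =>
          obtain ⟨t, ht⟩ := h
          simp at ht
          obtain ⟨hcd, htail⟩ := ht
          have hq' : '.' ∉ q' := fun hm => hq (by simp [hm])
          have he' : '.' ∉ e' := fun hm => he (by simp [hm])
          have : q' = e' := ih hq' he' ⟨t, by simpa using htail⟩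
          simp [hcd, this]

-- endswith on cs = (e ++ '.' :: st).reverse for a dot-free extension X
lemma endsw_iff (e st X : List Char) (he : '.' ∉ e) (hX : '.' ∉ X) :
    (PySem.Chars.endswith ((e ++ '.' :: st).reverse) ('.' :: X) = true) ↔ e = X.reverse := by
  rw [PySem.Chars.endswith_iff]
  constructor
  · intro h
    have h' : X.reverse ++ '.' :: ([] : List Char) <+: (e ++ '.' :: st) := by
      have := List.reverse_prefix.mpr h
      simpa using this
    have hXr : '.' ∉ X.reverse := by simpa using hX
    exact (prefix_dot_unique hXr he h').symm
  · intro hEq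
    subst hEq
    refine ⟨st.reverse, ?_⟩
    simp

lemma slice_neg_suffix (p q : List Char) (hq : q ≠ []) :
    PySem.List.slice (p ++ q) none (some (-(q.length : Int))) = p := by
  have hlen : 0 < q.length := List.length_pos_iff.mpr hq
  have h : PySem.List.clampIdx (p.length + q.length) (-(q.length : Int)) = p.length := by
    unfold PySem.List.clampIdx; split_ifs <;> omega
  simp [PySem.List.slice, h]

lemma slice_str (name : String) (p : List Char) (ext : String) (hne : ext.toList ≠ [])
    (hcs : name.toList = p ++ ext.toList) :
    PySem.Str.slice name none (some (-(PySem.Str.len ext))) = String.ofList p := by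
  apply String.toList_inj.mp
  rw [PySem.Str.len_eq]
  simp only [PySem.Str.slice, String.toList_ofList]
  rw [hcs]
  exact slice_neg_suffix p ext.toList hne

-- A's inner scan equals B's per-element strip, for every name
lemma per_name (name : String) : pvScanA name pvExtsA = pvStripOne name := by
  unfold pvStripOne
  cases h : pvRPartRev name.toList.reverse with
  | none =>
      have hdot : '.' ∉ name.toList := by
        have := pvRPartRev_none h
        simpa using this
      have hf : ∀ ext : String, '.' ∈ ext.toList →
          ¬ PySem.Str.endswith name ext = true := by
        intro ext hm hne
        rw [PySem.Str.endswith_eq] at hne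
        exact hdot (((PySem.Chars.endswith_iff _ _).mp hne).subset hm)
      show pvScanA name pvExtsA = name
      simp only [show pvExtsA = [".AppImage", ".appimage", ".zip", ".ZIP"] from rfl, pvScanA]
      rw [if_neg (hf ".AppImage" (by decide)),
          if_neg (hf ".appimage" (by decide)),
          if_neg (hf ".zip" (by decide)),
          if_neg (hf ".ZIP" (by decide))]
  | some pr =>
      obtain ⟨e, st⟩ := pr
      obtain ⟨hrs, he⟩ := pvRPartRev_some h
      have hcs : name.toList = (e ++ '.' :: st).reverse := by
        have := congrArg List.reverse hrs
        simpa using this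
      have hEnds : ∀ X : List Char, '.' ∉ X →
          ((PySem.Chars.endswith name.toList ('.' :: X) = true) ↔ e = X.reverse) := by
        intro X hX
        rw [hcs]
        exact endsw_iff e st X he hX
      by_cases h1 : e = "AppImage".toList.reverse
      · show pvScanA name pvExtsA = if e.reverse ∈ pvKnown then String.ofList st.reverse else name
        simp only [show pvExtsA = [".AppImage", ".appimage", ".zip", ".ZIP"] from rfl, pvScanA]
        rw [if_pos (by
          rw [PySem.Str.endswith_eq, show (".AppImage".toList = '.' :: "AppImage".toList) from rfl,
              hEnds "AppImage".toList (by decide)]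
          exact h1)]
        rw [if_pos (show e.reverse ∈ pvKnown by rw [h1]; decide)]
        exact slice_str name st.reverse ".AppImage" (by decide)
          (by rw [hcs, h1, show (".AppImage".toList = '.' :: "AppImage".toList) from rfl]; simp)
      by_cases h2 : e = "appimage".toList.reverse
      · show pvScanA name pvExtsA = if e.reverse ∈ pvKnown then String.ofList st.reverse else name
        simp only [show pvExtsA = [".AppImage", ".appimage", ".zip", ".ZIP"] from rfl, pvScanA]
        rw [if_neg (by
          rw [PySem.Str.endswith_eq, show (".AppImage".toList = '.' :: "AppImage".toList) from rfl,
              hEnds "AppImage".toList (by decide)]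
          rw [h2]; decide)]
        rw [if_pos (by
          rw [PySem.Str.endswith_eq, show (".appimage".toList = '.' :: "appimage".toList) from rfl,
              hEnds "appimage".toList (by decide)]
          exact h2)]
        rw [if_pos (show e.reverse ∈ pvKnown by rw [h2]; decide)]
        exact slice_str name st.reverse ".appimage" (by decide)
          (by rw [hcs, h2, show (".appimage".toList = '.' :: "appimage".toList) from rfl]; simp)
      by_cases h3 : e = "zip".toList.reverse
      · show pvScanA name pvExtsA = if e.reverse ∈ pvKnown then String.ofList st.reverse else name
        simp only [show pvExtsA = [".AppImage", ".appimage", ".zip", ".ZIP"] from rfl, pvScanA]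
        rw [if_neg (by
          rw [PySem.Str.endswith_eq, show (".AppImage".toList = '.' :: "AppImage".toList) from rfl,
              hEnds "AppImage".toList (by decide)]
          rw [h3]; decide)]
        rw [if_neg (by
          rw [PySem.Str.endswith_eq, show (".appimage".toList = '.' :: "appimage".toList) from rfl,
              hEnds "appimage".toList (by decide)]
          rw [h3]; decide)]
        rw [if_pos (by
          rw [PySem.Str.endswith_eq, show (".zip".toList = '.' :: "zip".toList) from rfl,
              hEnds "zip".toList (by decide)]
          exact h3)]
        rw [if_pos (show e.reverse ∈ pvKnown by rw [h3]; decide)]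
        exact slice_str name st.reverse ".zip" (by decide)
          (by rw [hcs, h3, show (".zip".toList = '.' :: "zip".toList) from rfl]; simp)
      by_cases h4 : e = "ZIP".toList.reverse
      · show pvScanA name pvExtsA = if e.reverse ∈ pvKnown then String.ofList st.reverse else name
        simp only [show pvExtsA = [".AppImage", ".appimage", ".zip", ".ZIP"] from rfl, pvScanA]
        rw [if_neg (by
          rw [PySem.Str.endswith_eq, show (".AppImage".toList = '.' :: "AppImage".toList) from rfl,
              hEnds "AppImage".toList (by decide)]
          rw [h4]; decide)]
        rw [if_neg (by
          rw [PySem.Str.endswith_eq, show (".appimage".toList = '.' :: "appimage".toList) from rfl,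
              hEnds "appimage".toList (by decide)]
          rw [h4]; decide)]
        rw [if_neg (by
          rw [PySem.Str.endswith_eq, show (".zip".toList = '.' :: "zip".toList) from rfl,
              hEnds "zip".toList (by decide)]
          rw [h4]; decide)]
        rw [if_pos (by
          rw [PySem.Str.endswith_eq, show (".ZIP".toList = '.' :: "ZIP".toList) from rfl,
              hEnds "ZIP".toList (by decide)]
          exact h4)]
        rw [if_pos (show e.reverse ∈ pvKnown by rw [h4]; decide)]
        exact slice_str name st.reverse ".ZIP" (by decide)
          (by rw [hcs, h4, show (".ZIP".toList = '.' :: "ZIP".toList) from rfl]; simp)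
      · show pvScanA name pvExtsA = if e.reverse ∈ pvKnown then String.ofList st.reverse else name
        simp only [show pvExtsA = [".AppImage", ".appimage", ".zip", ".ZIP"] from rfl, pvScanA]
        rw [if_neg (by
          rw [PySem.Str.endswith_eq, show (".AppImage".toList = '.' :: "AppImage".toList) from rfl,
              hEnds "AppImage".toList (by decide)]
          exact h1)]
        rw [if_neg (by
          rw [PySem.Str.endswith_eq, show (".appimage".toList = '.' :: "appimage".toList) from rfl,
              hEnds "appimage".toList (by decide)]
          exact h2)]
        rw [if_neg (by
          rw [PySem.Str.endswith_eq, show (".zip".toList = '.' :: "zip".toList) from rfl,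
              hEnds "zip".toList (by decide)]
          exact h3)]
        rw [if_neg (by
          rw [PySem.Str.endswith_eq, show (".ZIP".toList = '.' :: "ZIP".toList) from rfl,
              hEnds "ZIP".toList (by decide)]
          exact h4)]
        rw [if_neg (by
          intro hm
          simp only [pvKnown, List.mem_cons, List.not_mem_nil, or_false] at hm
          rcases hm with hm | hm | hm | hm
          · exact h1 (List.reverse_eq_iff.mp hm)
          · exact h2 (List.reverse_eq_iff.mp hm)
          · exact h3 (List.reverse_eq_iff.mp hm)
          · exact h4 (List.reverse_eq_iff.mp hm))]

-- ===== VERDICT (by name: the statement is the Claim_ definition above) =====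
theorem strip_extensions_list_py_spec : Claim_equal_strip_extensions_list_py := by
  intro filenames _
  unfold Spec_strip_extensions_list_py strip_extensions_list_py strip_extensions_list_py_alt
  rw [PySem.List.foldl_append_singleton_eq_map]
  exact List.map_congr_left (fun name _ => per_name name)
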